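-- pv_equiv track=rewrite | github.com/StickyPiston-Hosting/Easy-Map-Updater | lib/region_files/stats_scanner.py | extract_command_from_execute
-- ===== SOURCE A (Python) =====
-- def extract_command_from_execute(argument_list: list[str]) -> list[str]:
--     if argument_list[0] != "execute":
--         return argument_list
--     if len(argument_list) < 6:
--         return []
--     if argument_list[5] == "detect":
--         if len(argument_list) < 12:
--             return []
--         return extract_command_from_execute(argument_list[11:])
--     return extract_command_from_execute(argument_list[5:])
-- ===== SOURCE B (Python) =====
-- def extract_command_from_execute(argument_list: list[str]) -> list[str]:
--     i = 0
--     n = len(argument_list)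
--     while argument_list[i] == "execute":
--         if n - i < 6:
--             return []
--         if argument_list[i + 5] == "detect":
--             if n - i < 12:
--                 return []
--             i += 11
--         else:
--             i += 5
--     return argument_list[i:]
-- ===== Notes on version B (the rewrite author's own statement) =====
-- stated objective: alternative
-- what changed: Replaced the tail recursion with repeated list slicing by an iterative while loop that advances an index pointer over the unchanged list and slices once at the end.
import Mathlib
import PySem

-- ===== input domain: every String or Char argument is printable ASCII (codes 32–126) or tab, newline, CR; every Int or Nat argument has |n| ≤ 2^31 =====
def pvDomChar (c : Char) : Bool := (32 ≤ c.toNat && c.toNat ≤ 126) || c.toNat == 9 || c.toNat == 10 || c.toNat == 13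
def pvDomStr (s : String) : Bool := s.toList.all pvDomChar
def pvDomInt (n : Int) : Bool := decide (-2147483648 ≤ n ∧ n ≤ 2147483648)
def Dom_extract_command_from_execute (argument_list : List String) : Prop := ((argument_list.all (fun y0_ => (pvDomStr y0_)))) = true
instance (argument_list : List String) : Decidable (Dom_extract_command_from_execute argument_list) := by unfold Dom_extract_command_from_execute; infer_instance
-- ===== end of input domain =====

-- B replaces A's tail recursion with repeated slicing by an index-walking loop with one final slice (alternative decomposition).


-- ===== PORT A =====
def extract_command_from_execute (argument_list : List String) : List String :=
  if PySem.List.pyGet? argument_list 0 ≠ some "execute" then argument_list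
  else if argument_list.length < 6 then []
  else if PySem.List.pyGet? argument_list 5 = some "detect" then
    if argument_list.length < 12 then []
    else extract_command_from_execute (PySem.List.slice argument_list (some 11) none)
  else extract_command_from_execute (PySem.List.slice argument_list (some 5) none)
termination_by argument_list.length
decreasing_by
  · rw [PySem.List.slice_from _ (by norm_num)]
    simp only [List.length_drop]; omega
  · rw [PySem.List.slice_from _ (by norm_num)]
    simp only [List.length_drop]; omega

-- ===== PORT B =====
-- the while loop of Source B: index i over the unchanged list
def pvAltLoop (xs : List String) (i : Nat) : List String :=
  if PySem.List.pyGet? xs (i : Int) = some "execute" then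
    if xs.length - i < 6 then []
    else if PySem.List.pyGet? xs ((i : Int) + 5) = some "detect" then
      if xs.length - i < 12 then []
      else pvAltLoop xs (i + 11)
    else pvAltLoop xs (i + 5)
  else PySem.List.slice xs (some (i : Int)) none
termination_by xs.length - i
decreasing_by all_goals omega

def extract_command_from_execute_alt (argument_list : List String) : List String :=
  pvAltLoop argument_list 0

-- ===== PRECONDITION & SPEC =====
-- Python A raises IndexError exactly on the empty list (argument_list[0]); B raises there too.
def Pre_extract_command_from_execute (argument_list : List String) : Prop := argument_list ≠ []
instance (argument_list : List String) : Decidable (Pre_extract_command_from_execute argument_list) := by unfold Pre_extract_command_from_execute; infer_instance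
def pvWitness_extract_command_from_execute : List String := ["execute", "a", "b", "c", "d", "say", "hi"]

def Spec_extract_command_from_execute (argument_list : List String) (out : List String) : Prop := out = extract_command_from_execute_alt argument_list
instance (argument_list : List String) (out : List String) : Decidable (Spec_extract_command_from_execute argument_list out) := by unfold Spec_extract_command_from_execute; infer_instance

-- ===== CLAIM (what is proved, stated in full; the proofs are below) =====
def Claim_equal_extract_command_from_execute : Prop := ∀ (argument_list : List String), Dom_extract_command_from_execute argument_list → Pre_extract_command_from_execute argument_list → Spec_extract_command_from_execute argument_list (extract_command_from_execute argument_list)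

-- ===== LEMMAS AND PROOFS =====
-- The loop at index i computes exactly A on the suffix xs.drop i.
-- indexing/length facts relating the suffix xs.drop i to xs
theorem pvGet_drop_zero (xs : List String) (i : Nat) :
    PySem.List.pyGet? (List.drop i xs) 0 = xs[i]? := by
  rw [show (0 : Int) = ((0 : Nat) : Int) by norm_num, PySem.List.pyGet?_natCast]
  simp

theorem pvGet_drop_five (xs : List String) (i : Nat) :
    PySem.List.pyGet? (List.drop i xs) 5 = xs[i + 5]? := by
  rw [show (5 : Int) = ((5 : Nat) : Int) by norm_num, PySem.List.pyGet?_natCast]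
  simp [List.getElem?_drop]

theorem pvGet_add_five (xs : List String) (i : Nat) :
    PySem.List.pyGet? xs ((i : Int) + 5) = xs[i + 5]? := by
  rw [show ((i : Int) + 5) = ((i + 5 : Nat) : Int) by push_cast; ring,
    PySem.List.pyGet?_natCast]

theorem pvAltLoop_eq (xs : List String) (i : Nat) :
    pvAltLoop xs i = extract_command_from_execute (xs.drop i) := by
  fun_induction pvAltLoop xs i with
  | case1 i hget hlt =>
    simp only [PySem.List.pyGet?_natCast] at hget
    rw [extract_command_from_execute, pvGet_drop_zero]
    simp [hget, List.length_drop, hlt]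
  | case2 i hget hlt hdet hlt2 =>
    simp only [PySem.List.pyGet?_natCast] at hget
    rw [pvGet_add_five] at hdet
    rw [extract_command_from_execute, pvGet_drop_zero, pvGet_drop_five]
    simp [hget, hdet, List.length_drop, hlt, hlt2]
  | case3 i hget hlt hdet hlt2 ih =>
    simp only [PySem.List.pyGet?_natCast] at hget
    rw [pvGet_add_five] at hdet
    rw [ih]
    conv_rhs => rw [extract_command_from_execute]
    rw [pvGet_drop_zero, pvGet_drop_five]
    simp only [hget, hdet, List.length_drop, ne_eq, not_true_eq_false, if_false,
      if_neg hlt, if_neg hlt2]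
    rw [PySem.List.slice_from (List.drop i xs) (by norm_num), List.drop_drop]
    norm_num
    congr 1
  | case4 i hget hlt hdet ih =>
    simp only [PySem.List.pyGet?_natCast] at hget
    rw [pvGet_add_five] at hdet
    rw [ih]
    conv_rhs => rw [extract_command_from_execute]
    rw [pvGet_drop_zero, pvGet_drop_five]
    simp only [hget, hdet, List.length_drop, ne_eq, not_true_eq_false, if_false,
      if_neg hlt]
    rw [PySem.List.slice_from (List.drop i xs) (by norm_num), List.drop_drop]
    norm_num
    congr 1
  | case5 i hget =>
    simp only [PySem.List.pyGet?_natCast] at hget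
    rw [PySem.List.slice_from_natCast, extract_command_from_execute, pvGet_drop_zero]
    simp [hget]

-- ===== VERDICT (by name: the statement is the Claim_ definition above) =====
theorem extract_command_from_execute_spec : Claim_equal_extract_command_from_execute := by
  intro xs _ _
  show extract_command_from_execute xs = extract_command_from_execute_alt xs
  rw [extract_command_from_execute_alt, pvAltLoop_eq, List.drop_zero]
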